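-- pv_equiv track=rewrite | github.com/alexandraback/datacollection | solutions_5670465267826688_1/Python/bernardofpc/ijk.py | solve
-- ===== SOURCE A (Python) =====
-- def baseprod(a,b):
--     if a == 1: return b
--     if b == 1: return a
--     if a == 2: #i
--         if b == 2: return -1
--         if b == 3: return 4
--         if b == 4: return -3
--     if a == 3: #j
--         if b == 2: return -4
--         if b == 3: return -1
--         if b == 4: return 2
--     if a == 4: #k
--         if b == 2: return 3
--         if b == 3: return -2
--         if b == 4: return -1
--
-- def ijk_prod(a,b):
--     if a > 0 and b > 0:
--         return baseprod(a,b)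
--     if a > 0 and b < 0:
--         return -baseprod(a,-b)
--     if a < 0 and b > 0:
--         return -baseprod(-a,b)
--
--     return baseprod(-a,-b)
--
-- def ijk_pow(a,n):
--     if a == 1:
--         return 1
--     if a == -1:
--         if n % 2 == 0: return 1
--         else:          return -1
--
--     if n % 4 == 0: return 1
--     if n % 2 == 0: return -1
--
--     if n % 4 == 1: return a
--     else:          return -a
--
-- def ijk_to_num(a):
--     if a == 'i': return 2
--     if a == 'j': return 3
--     if a == 'k': return 4
--
-- def find_ij(v, rep):
--     cand = v*rep
--     p = 1
--     target = 2
--     for a in cand: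
--         p = ijk_prod(p,a)
--         if p == target:
--             if target == 3:
--                 return 1
--             p = 1
--             target = 3
--             continue
--
--     return 0
--
-- def solve(s, L, X):
--     ijk_s = [ijk_to_num(x) for x in s]
--     prodzao = 1
--     for a in ijk_s:
--         prodzao = ijk_prod(prodzao,a)
--
--     totProd = ijk_pow(prodzao, X)
--     if totProd != -1:
--         return 0
--
--     if X > 8: X = 8
--     return find_ij(ijk_s, X)
-- ===== SOURCE B (Python) =====
-- def _mul(a, b):
--     # quaternion unit product via sign/axis decomposition (1=1, 2=i, 3=j, 4=k)
--     s = 1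
--     if a < 0:
--         s = -s
--         a = -a
--     if b < 0:
--         s = -s
--         b = -b
--     if a == 1:
--         return s * b
--     if b == 1:
--         return s * a
--     if a == b:
--         return -s
--     c = 9 - a - b  # the remaining axis
--     if (a, b) in ((2, 3), (3, 4), (4, 2)):
--         return s * c
--     return -s * c
--
--
-- def solve(s, L, X):
--     basis = {'i': 2, 'j': 3, 'k': 4}
--     nums = [basis[c] for c in s]
--     total = 1
--     for a in nums:
--         total = _mul(total, a)
--     # total**X == -1, in closed form: (-1)**odd, or a pure-imaginary unit to n % 4 == 2
--     if not ((total == -1 and X % 2 == 1) or (total != 1 and total != -1 and X % 4 == 2)):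
--         return 0
--     rep = 8 if X > 8 else X
--     # prefix products of the repeated word, then indexed search: first i, then a later k
--     p = 1
--     P = [1]
--     for a in nums * rep:
--         p = _mul(p, a)
--         P.append(p)
--     try:
--         a = P.index(2)
--     except ValueError:
--         return 0
--     return 1 if 4 in P[a + 1:] else 0
-- ===== Notes on version B (the rewrite author's own statement) =====
-- stated objective: alternative
-- what changed: A's greedy accumulate-and-reset scan over the repeated word is replaced by building the prefix-product table once and doing two indexed searches (first prefix equal to i, then a later prefix equal to k, using the quaternion identity i*j=k), the lookup-table quaternion product is replaced by a sign/axis decomposition, and the ijk_pow call is replaced by a closed-form test on X mod 4.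
import Mathlib
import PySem

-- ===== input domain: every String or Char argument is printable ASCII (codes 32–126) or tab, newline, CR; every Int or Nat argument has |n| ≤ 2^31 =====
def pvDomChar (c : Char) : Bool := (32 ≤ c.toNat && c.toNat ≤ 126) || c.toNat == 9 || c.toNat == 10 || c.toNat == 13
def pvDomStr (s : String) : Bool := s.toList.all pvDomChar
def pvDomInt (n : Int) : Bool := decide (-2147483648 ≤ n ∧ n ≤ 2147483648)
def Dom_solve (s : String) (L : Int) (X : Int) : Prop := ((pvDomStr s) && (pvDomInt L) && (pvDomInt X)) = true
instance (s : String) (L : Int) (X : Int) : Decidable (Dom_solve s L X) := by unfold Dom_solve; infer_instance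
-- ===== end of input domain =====

-- B replaces A's greedy accumulate-and-reset scan by a prefix-product table with two
-- indexed searches, and replaces the product/power lookup tables by a sign/axis
-- decomposition and a closed-form power test (objective: alternative; equal cost).

-- ===== PORT A =====
-- Python's baseprod falls through (returns None) for arguments outside the unit
-- quaternions; those calls never happen under Pre_solve, ported as 0.
def baseprod (a b : Int) : Int :=
  if a = 1 then b
  else if b = 1 then a
  else if a = 2 then
    (if b = 2 then -1 else if b = 3 then 4 else if b = 4 then -3 else 0)
  else if a = 3 then
    (if b = 2 then -4 else if b = 3 then -1 else if b = 4 then 2 else 0)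
  else if a = 4 then
    (if b = 2 then 3 else if b = 3 then -2 else if b = 4 then -1 else 0)
  else 0

def ijk_prod (a b : Int) : Int :=
  if a > 0 ∧ b > 0 then baseprod a b
  else if a > 0 ∧ b < 0 then -baseprod a (-b)
  else if a < 0 ∧ b > 0 then -baseprod (-a) b
  else baseprod (-a) (-b)

def ijk_pow (a n : Int) : Int :=
  if a = 1 then 1
  else if a = -1 then (if PySem.Int.mod n 2 = 0 then 1 else -1)
  else if PySem.Int.mod n 4 = 0 then 1
  else if PySem.Int.mod n 2 = 0 then -1
  else if PySem.Int.mod n 4 = 1 then a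
  else -a

-- Python returns None for characters other than i/j/k (excluded by Pre_solve); ported as 0.
def ijk_to_num (a : Char) : Int :=
  if a = 'i' then 2 else if a = 'j' then 3 else if a = 'k' then 4 else 0

-- the for-loop of find_ij with its early return and reset, state (p, target)
def find_ij_loop : List Int → Int → Int → Int
  | [], _, _ => 0
  | a :: rest, p, target =>
    let p' := ijk_prod p a
    if p' = target then
      if target = 3 then 1
      else find_ij_loop rest 1 3
    else find_ij_loop rest p' target

def find_ij (v : List Int) (rep : Int) : Int :=
  find_ij_loop (PySem.List.pyRepeat v rep) 1 2

def solve (s : String) (L : Int) (X : Int) : Int :=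
  let ijk_s := s.toList.map ijk_to_num
  let prodzao := ijk_s.foldl ijk_prod 1
  let totProd := ijk_pow prodzao X
  if totProd ≠ -1 then 0
  else
    let X' := if X > 8 then 8 else X
    find_ij ijk_s X'

-- ===== PORT B =====
-- Source B's _mul: sign/axis decomposition of the unit-quaternion product
def pvMul (a b : Int) : Int :=
  let s : Int := 1
  let s := if a < 0 then -s else s
  let a := if a < 0 then -a else a
  let s := if b < 0 then -s else s
  let b := if b < 0 then -b else b
  if a = 1 then s * b
  else if b = 1 then s * a
  else if a = b then -s
  else
    let c := 9 - a - b
    if (a = 2 ∧ b = 3) ∨ (a = 3 ∧ b = 4) ∨ (a = 4 ∧ b = 2) then s * c else -s * c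

-- Source B's dict lookup basis[c]; KeyError (excluded by Pre_solve) ported as default 0
def pvBasis (c : Char) : Int :=
  PySem.Dict.getD (PySem.Dict.ofList [('i', 2), ('j', 3), ('k', 4)]) c 0

def solve_alt (s : String) (L : Int) (X : Int) : Int :=
  let nums := s.toList.map pvBasis
  let total := nums.foldl pvMul 1
  if ¬((total = -1 ∧ PySem.Int.mod X 2 = 1) ∨
       (total ≠ 1 ∧ total ≠ -1 ∧ PySem.Int.mod X 4 = 2)) then 0
  else
    let rep := if X > 8 then 8 else X
    let pP := (PySem.List.pyRepeat nums rep).foldl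
      (fun (st : Int × List Int) a =>
        let p' := pvMul st.1 a
        (p', st.2 ++ [p'])) (1, [1])
    match PySem.List.index? pP.2 2 with
    | none => 0
    | some a => if (4 : Int) ∈ PySem.List.slice pP.2 (some ((a : Int) + 1)) none then 1 else 0

-- ===== PRECONDITION & SPEC =====
-- A raises TypeError (B a KeyError) whenever s contains a character other than i/j/k.
def Pre_solve (s : String) (L : Int) (X : Int) : Prop :=
  (s.toList.all fun c => c == 'i' || c == 'j' || c == 'k') = true
instance (s : String) (L : Int) (X : Int) : Decidable (Pre_solve s L X) := by
  unfold Pre_solve; infer_instance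

def pvWitness_solve : String × Int × Int := ("ik", 0, 2)

def Spec_solve (s : String) (L : Int) (X : Int) (out : Int) : Prop := out = solve_alt s L X
instance (s : String) (L : Int) (X : Int) (out : Int) : Decidable (Spec_solve s L X out) := by
  unfold Spec_solve; infer_instance

-- ===== CLAIM (what is proved, stated in full; the proofs are below) =====
def Claim_equal_solve : Prop :=
  ∀ (s : String) (L : Int) (X : Int), Dom_solve s L X → Pre_solve s L X →
    Spec_solve s L X (solve s L X)

-- ===== LEMMAS AND PROOFS =====

-- the eight unit quaternions
def Q8 : List Int := [1, -1, 2, -2, 3, -3, 4, -4]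

theorem pvMul_eq_prod : ∀ a ∈ Q8, ∀ b ∈ Q8, pvMul a b = ijk_prod a b := by decide

theorem q8_mul_mem : ∀ a ∈ Q8, ∀ b ∈ Q8, ijk_prod a b ∈ Q8 := by decide

theorem prod_assoc : ∀ a ∈ Q8, ∀ b ∈ Q8, ∀ c ∈ Q8,
    ijk_prod (ijk_prod a b) c = ijk_prod a (ijk_prod b c) := by decide

theorem basis_eq_to_num (c : Char) (hc : c = 'i' ∨ c = 'j' ∨ c = 'k') :
    pvBasis c = ijk_to_num c := by
  rcases hc with h | h | h <;> subst h <;> decide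

-- tail of the prefix-product list started at p
def scanT (p : Int) : List Int → List Int
  | [] => []
  | a :: r => (ijk_prod p a) :: scanT (ijk_prod p a) r

theorem scanT_mem (l : List Int) (hl : ∀ x ∈ l, x ∈ Q8) :
    ∀ p ∈ Q8, ∀ x ∈ scanT p l, x ∈ Q8 := by
  induction l with
  | nil => intro p _ x hx; simp [scanT] at hx
  | cons a r ih =>
    intro p hp x hx
    have ha : a ∈ Q8 := hl a (by simp)
    have hp' : ijk_prod p a ∈ Q8 := q8_mul_mem p hp a ha
    simp only [scanT, List.mem_cons] at hx
    rcases hx with rfl | hx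
    · exact hp'
    · exact ih (fun x hx => hl x (by simp [hx])) _ hp' x hx

theorem scanT_map (l : List Int) (hl : ∀ x ∈ l, x ∈ Q8) :
    ∀ q ∈ Q8, ∀ p ∈ Q8, scanT (ijk_prod q p) l = (scanT p l).map (ijk_prod q) := by
  induction l with
  | nil => intro q _ p _; simp [scanT]
  | cons a r ih =>
    intro q hq p hp
    have ha : a ∈ Q8 := hl a (by simp)
    simp only [scanT, List.map_cons]
    rw [prod_assoc q hq p hp a ha]
    exact congrArg (List.cons _) (ih (fun x hx => hl x (by simp [hx])) q hq _ (q8_mul_mem p hp a ha))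

theorem phase3 (l : List Int) : ∀ p, find_ij_loop l p 3 = if (3 : Int) ∈ scanT p l then 1 else 0 := by
  induction l with
  | nil => intro p; simp [find_ij_loop, scanT]
  | cons a r ih =>
    intro p
    simp only [find_ij_loop, scanT]
    by_cases h : ijk_prod p a = 3
    · simp [h]
    · simp [h, ih, eq_comm]

theorem phase2 (l : List Int) : ∀ p ∈ Q8, (∀ x ∈ l, x ∈ Q8) →
    find_ij_loop l p 2 =
      (match PySem.List.index? (scanT p l) 2 with
        | none => 0
        | some a => if (4 : Int) ∈ (scanT p l).drop (a + 1) then 1 else 0) := by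
  induction l with
  | nil => intro p _ _; simp [find_ij_loop, scanT, PySem.List.index?]
  | cons a r ih =>
    intro p hp hl
    have ha : a ∈ Q8 := hl a (by simp)
    have hp' : ijk_prod p a ∈ Q8 := q8_mul_mem p hp a ha
    have hr : ∀ x ∈ r, x ∈ Q8 := fun x hx => hl x (by simp [hx])
    simp only [find_ij_loop, scanT]
    by_cases h : ijk_prod p a = 2
    · rw [if_pos h, if_neg (by norm_num)]
      simp only [h, PySem.List.index?_cons_self]
      simp only [List.drop_succ_cons, List.drop_zero]
      rw [phase3]
      have hmap : scanT 2 r = (scanT 1 r).map (ijk_prod 2) := by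
        have := scanT_map r hr 2 (by decide) 1 (by decide)
        simpa using this
      have hiff : (3 : Int) ∈ scanT 1 r ↔ (4 : Int) ∈ scanT 2 r := by
        rw [hmap, List.mem_map]
        constructor
        · intro h3; exact ⟨3, h3, by decide⟩
        · rintro ⟨x, hx, hx4⟩
          have hxQ : x ∈ Q8 := scanT_mem r hr 1 (by decide) x hx
          have : ∀ y ∈ Q8, ijk_prod 2 y = 4 → y = 3 := by decide
          have := this x hxQ hx4
          subst this; exact hx
      by_cases h3 : (3 : Int) ∈ scanT 1 r
      · rw [if_pos h3, if_pos (hiff.mp h3)]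
      · rw [if_neg h3, if_neg (fun h4 => h3 (hiff.mpr h4))]
    · rw [if_neg h, PySem.List.index?_cons_of_ne _ h]
      rw [ih _ hp' hr]
      cases hidx : PySem.List.index? (scanT (ijk_prod p a) r) 2 with
      | none => simp
      | some k => simp

-- B's fold builds (product, 1 :: prefix-product tail)
theorem fold_pair (l : List Int) : ∀ p ∈ Q8, (∀ x ∈ l, x ∈ Q8) → ∀ acc : List Int,
    l.foldl (fun (st : Int × List Int) a => (pvMul st.1 a, st.2 ++ [pvMul st.1 a]))
      (p, acc) = (l.foldl ijk_prod p, acc ++ scanT p l) := by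
  induction l with
  | nil => intro p _ _ acc; simp [scanT]
  | cons a r ih =>
    intro p hp hl acc
    have ha : a ∈ Q8 := hl a (by simp)
    have hp' : ijk_prod p a ∈ Q8 := q8_mul_mem p hp a ha
    simp only [List.foldl_cons, scanT, pvMul_eq_prod p hp a ha]
    rw [ih _ hp' (fun x hx => hl x (by simp [hx]))]
    simp

theorem fold_mul_eq (l : List Int) : ∀ p ∈ Q8, (∀ x ∈ l, x ∈ Q8) →
    l.foldl pvMul p = l.foldl ijk_prod p ∧ l.foldl ijk_prod p ∈ Q8 := by
  induction l with
  | nil => intro p hp _; exact ⟨rfl, hp⟩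
  | cons a r ih =>
    intro p hp hl
    have ha : a ∈ Q8 := hl a (by simp)
    have hp' : ijk_prod p a ∈ Q8 := q8_mul_mem p hp a ha
    have := ih _ hp' (fun x hx => hl x (by simp [hx]))
    simpa [pvMul_eq_prod p hp a ha] using this

theorem pow_neg_one_iff : ∀ p ∈ Q8, ∀ X : Int,
    (ijk_pow p X = -1 ↔
      ((p = -1 ∧ PySem.Int.mod X 2 = 1) ∨ (p ≠ 1 ∧ p ≠ -1 ∧ PySem.Int.mod X 4 = 2))) := by
  intro p hp X
  have h2 : PySem.Int.mod X 2 = X % 2 := PySem.Int.mod_eq_emod_of_pos (by norm_num)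
  have h4 : PySem.Int.mod X 4 = X % 4 := PySem.Int.mod_eq_emod_of_pos (by norm_num)
  simp only [Q8, List.mem_cons, List.not_mem_nil, or_false] at hp
  rcases hp with rfl | rfl | rfl | rfl | rfl | rfl | rfl | rfl <;>
    simp only [ijk_pow, h2, h4] <;> split_ifs <;> constructor <;> intro h <;>
      first
        | omega
        | tauto
        | (rcases h with ⟨hf, -⟩ | ⟨-, -, hm⟩ <;> first | exact hf.elim | omega)
        | (rcases h with h | ⟨-, -, hm⟩ <;> omega)
        | exact Or.inl ⟨trivial, by omega⟩

theorem pyRepeat_mem {α : Type} (xs : List α) (n : Int) :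
    ∀ x ∈ PySem.List.pyRepeat xs n, x ∈ xs := by
  intro x hx
  unfold PySem.List.pyRepeat at hx
  simp only [List.mem_flatten, List.mem_replicate] at hx
  rcases hx with ⟨l, ⟨_, rfl⟩, hxl⟩
  exact hxl

-- the -1 branch: A's greedy scan equals B's prefix-table search
theorem branch_eq (nums : List Int) (hnQ : ∀ x ∈ nums, x ∈ Q8) (rep : Int) :
    find_ij nums rep =
      (let pP := (PySem.List.pyRepeat nums rep).foldl
          (fun (st : Int × List Int) a => (pvMul st.1 a, st.2 ++ [pvMul st.1 a])) (1, [1])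
       match PySem.List.index? pP.2 2 with
        | none => 0
        | some a => if (4 : Int) ∈ PySem.List.slice pP.2 (some ((a : Int) + 1)) none then 1 else 0) := by
  have hcQ : ∀ x ∈ PySem.List.pyRepeat nums rep, x ∈ Q8 :=
    fun x hx => hnQ x (pyRepeat_mem nums rep x hx)
  simp only [fold_pair (PySem.List.pyRepeat nums rep) 1 (by decide) hcQ [1]]
  unfold find_ij
  rw [phase2 (PySem.List.pyRepeat nums rep) 1 (by decide) hcQ]
  rw [show ([1] ++ scanT 1 (PySem.List.pyRepeat nums rep) : List Int)
      = 1 :: scanT 1 (PySem.List.pyRepeat nums rep) from rfl]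
  rw [PySem.List.index?_cons_of_ne _ (by norm_num : (1 : Int) ≠ 2)]
  cases hidx : PySem.List.index? (scanT 1 (PySem.List.pyRepeat nums rep)) 2 with
  | none => simp
  | some k =>
    simp only [Option.map_some]
    have hslice : PySem.List.slice (1 :: scanT 1 (PySem.List.pyRepeat nums rep))
        (some (((k + 1 : Nat) : Int) + 1)) none
        = (scanT 1 (PySem.List.pyRepeat nums rep)).drop (k + 1) := by
      have hcast : (((k + 1 : Nat) : Int) + 1) = ((k + 2 : Nat) : Int) := by push_cast; ring
      rw [hcast, PySem.List.slice_from_natCast]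
      simp
    rw [hslice]

-- ===== VERDICT (by name: the statement is the Claim_ definition above) =====
theorem solve_spec : Claim_equal_solve := by
  intro s L X _ hPreB
  have hPre : ∀ c ∈ s.toList, c = 'i' ∨ c = 'j' ∨ c = 'k' := by
    intro c hc
    have := List.all_eq_true.mp hPreB c hc
    simpa [or_assoc] using this
  unfold Spec_solve solve solve_alt
  have hnums : s.toList.map pvBasis = s.toList.map ijk_to_num :=
    List.map_congr_left (fun c hc => basis_eq_to_num c (hPre c hc))
  have hnQ : ∀ x ∈ s.toList.map ijk_to_num, x ∈ Q8 := by
    intro x hx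
    simp only [List.mem_map] at hx
    rcases hx with ⟨c, hc, rfl⟩
    rcases hPre c hc with h | h | h <;> subst h <;> decide
  have hfm := fold_mul_eq (s.toList.map ijk_to_num) 1 (by decide) hnQ
  have hpow := pow_neg_one_iff _ hfm.2 X
  simp only [hnums, hfm.1]
  by_cases hneg : ijk_pow ((s.toList.map ijk_to_num).foldl ijk_prod 1) X = -1
  · have hA := not_not_intro hneg
    have hB := not_not_intro (hpow.mp hneg)
    rw [if_neg hA, if_neg hB]
    exact branch_eq _ hnQ _
  · have hB := fun hc => hneg (hpow.mpr hc)
    rw [if_pos hneg, if_pos hB]
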